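-- pv_equiv track=rewrite | github.com/olivier555/Projet-MOPSI | AffichageCollier.py | collier_fil_coupe
-- ===== SOURCE A (Python) =====
-- def collier_fil_coupe(liste_fil_visible):
--     """Renvoit la liste correspondant a la repartition
--     de liste_fil_visible"""
--
--     liste = [1]
--     voleur = 1
--     for bool in liste_fil_visible:
--         if bool:
--             liste.append(voleur)
--         else:
--             voleur = - voleur
--             liste.append(voleur)
--     return liste
-- ===== SOURCE B (Python) =====
-- def collier_fil_coupe(liste_fil_visible):
--     """Renvoit la liste correspondant a la repartition
--     de liste_fil_visible"""
--     counts = []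
--     c = 0
--     for b in liste_fil_visible:
--         if not b:
--             c += 1
--         counts.append(c)
--     return [1] + [(-1) ** k for k in counts]
-- ===== Notes on version B (the rewrite author's own statement) =====
-- stated objective: alternative
-- what changed: Replaces the toggled sign variable with a two-pass decomposition: first build the prefix table of cut (False) counts, then map each count to (-1)**count, prefixed by 1.
import Mathlib
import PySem

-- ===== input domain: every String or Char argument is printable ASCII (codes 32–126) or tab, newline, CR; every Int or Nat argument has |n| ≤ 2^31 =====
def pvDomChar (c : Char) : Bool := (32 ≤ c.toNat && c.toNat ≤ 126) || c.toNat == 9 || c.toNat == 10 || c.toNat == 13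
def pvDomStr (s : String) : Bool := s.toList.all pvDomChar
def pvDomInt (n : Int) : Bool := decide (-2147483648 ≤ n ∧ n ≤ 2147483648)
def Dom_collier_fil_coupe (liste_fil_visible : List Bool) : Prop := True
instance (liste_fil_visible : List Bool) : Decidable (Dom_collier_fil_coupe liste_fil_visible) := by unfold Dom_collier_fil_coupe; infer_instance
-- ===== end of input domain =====

-- B replaces A's toggled sign accumulator by a prefix cut-count table mapped through (-1)^count (alternative decomposition, same cost).

-- ===== PORT A =====
-- loop state: (liste, voleur)
def collier_fil_coupe (liste_fil_visible : List Bool) : List Int :=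
  (liste_fil_visible.foldl
    (fun (s : List Int × Int) b =>
      if b then (s.1 ++ [s.2], s.2)
      else (s.1 ++ [-s.2], -s.2))
    ([1], 1)).1

-- ===== PORT B =====
-- pass 1: prefix counts of False; loop state: (counts, c)
def pvCountsFold (liste_fil_visible : List Bool) (init : List Nat × Nat) : List Nat × Nat :=
  liste_fil_visible.foldl
    (fun (s : List Nat × Nat) b =>
      let c := if !b then s.2 + 1 else s.2
      (s.1 ++ [c], c))
    init

-- pass 2: [1] ++ the counts mapped to (-1)^k
def collier_fil_coupe_alt (liste_fil_visible : List Bool) : List Int :=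
  let counts := (pvCountsFold liste_fil_visible ([], 0)).1
  [1] ++ counts.map (fun k => (-1 : Int) ^ k)

-- ===== PRECONDITION & SPEC =====
def Spec_collier_fil_coupe (liste_fil_visible : List Bool) (out : List Int) : Prop := out = collier_fil_coupe_alt liste_fil_visible
instance (liste_fil_visible : List Bool) (out : List Int) : Decidable (Spec_collier_fil_coupe liste_fil_visible out) := by unfold Spec_collier_fil_coupe; infer_instance

-- ===== CLAIM (what is proved, stated in full; the proofs are below) =====
def Claim_equal_collier_fil_coupe : Prop := ∀ (liste_fil_visible : List Bool), Dom_collier_fil_coupe liste_fil_visible → Spec_collier_fil_coupe liste_fil_visible (collier_fil_coupe liste_fil_visible)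

-- ===== LEMMAS AND PROOFS =====

lemma pvCountsFold_cons (b : Bool) (t : List Bool) (acc : List Nat) (c : Nat) :
    pvCountsFold (b :: t) (acc, c)
      = pvCountsFold t (acc ++ [if !b then c + 1 else c], if !b then c + 1 else c) := rfl

-- B's count fold with an accumulator = accumulator ++ fold from [], same counter
lemma pvCountsFold_append (l : List Bool) (acc : List Nat) (c : Nat) :
    pvCountsFold l (acc, c) = (acc ++ (pvCountsFold l ([], c)).1, (pvCountsFold l ([], c)).2) := by
  induction l generalizing acc c with
  | nil => simp [pvCountsFold]
  | cons b t ih =>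
    rw [pvCountsFold_cons, pvCountsFold_cons]
    rw [ih (acc ++ [if !b then c + 1 else c]) _, ih ([] ++ [if !b then c + 1 else c]) _]
    simp

-- invariant: A's fold starting at sign (-1)^c equals acc ++ the mapped counts fold
lemma fold_AB (l : List Bool) (acc : List Int) (c : Nat) :
    (l.foldl (fun (s : List Int × Int) b =>
        if b then (s.1 ++ [s.2], s.2) else (s.1 ++ [-s.2], -s.2)) (acc, (-1 : Int) ^ c)).1
      = acc ++ ((pvCountsFold l ([], c)).1).map (fun k => (-1 : Int) ^ k) := by
  induction l generalizing acc c with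
  | nil => simp [pvCountsFold]
  | cons b t ih =>
    cases b with
    | true =>
      simp only [List.foldl_cons, if_true]
      rw [ih (acc ++ [(-1 : Int) ^ c]) c, pvCountsFold_cons]
      simp only [Bool.not_true, Bool.false_eq_true, if_false, List.nil_append]
      rw [pvCountsFold_append t [c] c]
      simp
    | false =>
      simp only [List.foldl_cons, Bool.false_eq_true, if_false]
      have hneg : -(-1 : Int) ^ c = (-1 : Int) ^ (c + 1) := by ring
      rw [hneg, ih (acc ++ [(-1 : Int) ^ (c + 1)]) (c + 1), pvCountsFold_cons]
      simp only [Bool.not_false, if_true, List.nil_append]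
      rw [pvCountsFold_append t [c + 1] (c + 1)]
      simp

-- ===== VERDICT (by name: the statement is the Claim_ definition above) =====
theorem collier_fil_coupe_spec : Claim_equal_collier_fil_coupe := by
  intro l _
  unfold Spec_collier_fil_coupe collier_fil_coupe collier_fil_coupe_alt
  have h := fold_AB l [1] 0
  simpa using h
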